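-- pv_equiv track=rewrite | github.com/mayypanem/speech-text-gpt-semdis | plot_graph.py | split_into_two_lines
-- ===== SOURCE A (Python) =====
-- def split_into_two_lines(text):
--     """Splits a string into two lines of approximately equal length."""
--     words = text.split()
--     # If it's a single word, return as is
--     if len(words) == 1:
--         return text
--
--     first_line = [words[0]]
--     second_line = [words[-1]]
--     words = words[1:-1]
--
--     while len(words) > 0:
--         len_first_line = sum(len(word) for word in first_line) + len(first_line) - 1
--         len_second_line = sum(len(word) for word in second_line) + len(second_line) - 1
--         if len_first_line > len_second_line:
--             second_line.insert(0,words.pop())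
--         else:
--             first_line.append(words.pop(0))
--     return " ".join(first_line) + "\n" + " ".join(second_line)
-- ===== SOURCE B (Python) =====
-- def split_into_two_lines(text):
--     """Splits a string into two lines of approximately equal length."""
--     words = text.split()
--     # If it's a single word, return as is
--     if len(words) == 1:
--         return text
--     n = len(words)
--     i, j = 1, n - 2
--     len1 = len(words[0])
--     len2 = len(words[n - 1])
--     while i <= j:
--         if len1 > len2:
--             len2 += len(words[j]) + 1
--             j -= 1
--         else:
--             len1 += len(words[i]) + 1
--             i += 1
--     return " ".join(words[:i]) + "\n" + " ".join(words[j + 1:])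
-- ===== Notes on version B (the rewrite author's own statement) =====
-- stated objective: alternative
-- what changed: B replaces A's loop (which re-sums both lines' word lengths on every iteration and pops/inserts at list ends) by a single two-pointer pass over the word list with incrementally maintained running line lengths, emitting the two lines as slices at the end.
import Mathlib
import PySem

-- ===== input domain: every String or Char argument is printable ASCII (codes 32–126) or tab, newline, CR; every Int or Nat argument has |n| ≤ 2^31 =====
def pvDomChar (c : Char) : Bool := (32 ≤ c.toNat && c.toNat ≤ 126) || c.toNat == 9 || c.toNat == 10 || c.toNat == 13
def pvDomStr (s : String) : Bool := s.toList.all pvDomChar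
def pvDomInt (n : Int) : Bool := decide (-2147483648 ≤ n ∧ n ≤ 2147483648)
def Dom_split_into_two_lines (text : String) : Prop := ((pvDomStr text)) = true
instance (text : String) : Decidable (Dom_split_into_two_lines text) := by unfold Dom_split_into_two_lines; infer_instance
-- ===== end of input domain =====

-- B replaces A's loop that re-sums both lines and pops/inserts at list ends each iteration
-- by a single two-pointer pass with incrementally maintained running line lengths (alternative).

-- ===== PORT A =====
-- sum(len(word) for word in l) + len(l) - 1
def pvJoinLen (l : List String) : Int :=
  (l.map (fun w => (PySem.Str.len w : Int))).sum + l.length - 1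

-- A's while loop over the state (first_line, second_line, words); the fuel is the exact
-- number of remaining iterations (one word of ws is consumed per step), so the 0-case is
-- reached exactly when ws is empty
def pvLoopAF : Nat → List String → List String → List String → List String × List String
  | 0, f, s, _ => (f, s)
  | fuel + 1, f, s, ws =>
    if h : ws = [] then (f, s)
    else
      if pvJoinLen f > pvJoinLen s then
        pvLoopAF fuel f (ws.getLast h :: s) ws.dropLast
      else
        pvLoopAF fuel (f ++ [ws.head h]) s ws.tail

def pvLoopA (f s ws : List String) : List String × List String :=
  pvLoopAF ws.length f s ws

-- words[0] / words[-1] raise IndexError on an empty list; Pre_ excludes that input,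
-- so the `.getD ""` defaults are never reached under Pre_.
def split_into_two_lines (text : String) : String :=
  let words := PySem.Str.split₀ text
  if words.length == 1 then text
  else
    let p := pvLoopA [words.getD 0 ""] [((PySem.List.pyGet? words (-1)).getD "")]
               (PySem.List.slice words (some 1) (some (-1)))
    PySem.Str.join " " p.1 ++ "\n" ++ PySem.Str.join " " p.2

-- ===== PORT B =====
-- len(words[k]); in-range under Pre_ (Python raises outside, never reached)
def pvWordLen (words : List String) (k : Int) : Int :=
  (PySem.Str.len (PySem.List.pyGetD words k "") : Int)

-- B's two-pointer while loop: only the indices and the two running lengths move; the fuel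
-- (j + 1 - i).toNat is the exact number of remaining iterations, so the 0-case is reached
-- exactly when i > j
def pvLoopBF : Nat → List String → Int → Int → Int → Int → Int × Int
  | 0, _, i, j, _, _ => (i, j)
  | fuel + 1, words, i, j, len1, len2 =>
    if i ≤ j then
      if len1 > len2 then
        pvLoopBF fuel words i (j - 1) len1 (len2 + pvWordLen words j + 1)
      else
        pvLoopBF fuel words (i + 1) j (len1 + pvWordLen words i + 1) len2
    else (i, j)

def pvLoopB (words : List String) (i j len1 len2 : Int) : Int × Int :=
  pvLoopBF (j + 1 - i).toNat words i j len1 len2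

def split_into_two_lines_alt (text : String) : String :=
  let words := PySem.Str.split₀ text
  if words.length == 1 then text
  else
    let n : Int := words.length
    let p := pvLoopB words 1 (n - 2) (pvWordLen words 0) (pvWordLen words (n - 1))
    PySem.Str.join " " (PySem.List.slice words none (some p.1)) ++ "\n" ++
      PySem.Str.join " " (PySem.List.slice words (some (p.2 + 1)) none)

-- ===== PRECONDITION & SPEC =====
-- Pre_ excludes only empty/whitespace-only text: there text.split() == [] and A raises
-- IndexError on words[0] (B raises identically on words[0]).
def Pre_split_into_two_lines (text : String) : Prop := PySem.Str.split₀ text ≠ []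
instance (text : String) : Decidable (Pre_split_into_two_lines text) := by
  unfold Pre_split_into_two_lines; infer_instance

def pvWitness_split_into_two_lines : String := "ab cd e"

def Spec_split_into_two_lines (text : String) (out : String) : Prop := out = split_into_two_lines_alt text
instance (text : String) (out : String) : Decidable (Spec_split_into_two_lines text out) := by unfold Spec_split_into_two_lines; infer_instance

-- ===== CLAIM (what is proved, stated in full; the proofs are below) =====
def Claim_equal_split_into_two_lines : Prop := ∀ (text : String), Dom_split_into_two_lines text → Pre_split_into_two_lines text → Spec_split_into_two_lines text (split_into_two_lines text)

-- ===== LEMMAS AND PROOFS =====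

theorem pvJoinLen_cons (x : String) (l : List String) :
    pvJoinLen (x :: l) = (PySem.Str.len x : Int) + 1 + pvJoinLen l := by
  simp [pvJoinLen]; ring

theorem pvJoinLen_append_singleton (l : List String) (x : String) :
    pvJoinLen (l ++ [x]) = pvJoinLen l + (PySem.Str.len x : Int) + 1 := by
  simp [pvJoinLen]; ring

theorem pvJoinLen_singleton (x : String) : pvJoinLen [x] = (PySem.Str.len x : Int) := by
  simp [pvJoinLen]

theorem pvWordLen_eq (w : List String) (k : Nat) (h : k < w.length) :
    pvWordLen w (k : Int) = (PySem.Str.len w[k] : Int) := by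
  simp [pvWordLen, List.getD_eq_getElem?_getD, List.getElem?_eq_getElem h]

theorem pvTailTake {α : Type} (l : List α) (n : Nat) : (l.take n).tail = l.tail.take (n - 1) := by
  cases l <;> cases n <;> simp

-- exit bounds of B's loop (needed to turn the final slices into take/drop)
theorem pvLoopB_bounds (fuel : Nat) : ∀ (w : List String) (i j l1 l2 : Int),
    i ≤ j + 1 →
    i ≤ (pvLoopBF fuel w i j l1 l2).1 ∧ i - 1 ≤ (pvLoopBF fuel w i j l1 l2).2 := by
  induction fuel with
  | zero =>
    intro w i j l1 l2 hij
    simp only [pvLoopBF]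
    exact ⟨le_refl _, by omega⟩
  | succ m ih =>
    intro w i j l1 l2 hij
    simp only [pvLoopBF]
    by_cases hle : i ≤ j
    · rw [if_pos hle]
      by_cases hgt : l1 > l2
      · rw [if_pos hgt]
        exact ih w i (j - 1) l1 (l2 + pvWordLen w j + 1) (by omega)
      · rw [if_neg hgt]
        have := ih w (i + 1) j (l1 + pvWordLen w i + 1) l2 (by omega)
        exact ⟨by omega, by omega⟩
    · rw [if_neg hle]
      exact ⟨le_refl _, by omega⟩

-- the main invariant: A's loop state is always (w.take i, w.drop (j+1), middle slice),
-- A's recomputed line lengths are exactly B's running ones, and both loops run for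
-- exactly fuel = J + 1 - I more iterations
theorem pvBridge (fuel : Nat) : ∀ (w : List String) (I J : Nat),
    fuel = J + 1 - I → 1 ≤ I → I ≤ J + 1 → J + 1 < w.length →
    pvLoopAF fuel (w.take I) (w.drop (J + 1)) ((w.drop I).take (J + 1 - I)) =
      (w.take ((pvLoopBF fuel w I J (pvJoinLen (w.take I)) (pvJoinLen (w.drop (J + 1)))).1).toNat,
       w.drop (((pvLoopBF fuel w I J (pvJoinLen (w.take I)) (pvJoinLen (w.drop (J + 1)))).2) + 1).toNat) := by
  induction fuel with
  | zero =>
    intro w I J hm h1 hij hj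
    have hi : I = J + 1 := by omega
    subst hi
    simp only [pvLoopAF, pvLoopBF]
    have h2 : ((J : Int) + 1).toNat = J + 1 := by omega
    simp [h2]
  | succ m ih =>
    intro w I J hm h1 hij hj
    have hle : I ≤ J := by omega
    have hjlt : J < w.length := by omega
    have hilt : I < w.length := by omega
    have hmidlen : ((w.drop I).take (J + 1 - I)).length = J + 1 - I := by
      simp [List.length_take, List.length_drop]; omega
    have hmidne : (w.drop I).take (J + 1 - I) ≠ [] := by
      intro hc; rw [hc] at hmidlen; simp at hmidlen; omega
    have hIJ : ((I : Int) ≤ (J : Int)) := by exact_mod_cast hle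
    simp only [pvLoopAF, pvLoopBF]
    rw [dif_neg hmidne, if_pos hIJ]
    by_cases hgt : pvJoinLen (w.take I) > pvJoinLen (w.drop (J + 1))
    · rw [if_pos hgt, if_pos hgt]
      have hlast : ((w.drop I).take (J + 1 - I)).getLast hmidne = w[J] := by
        rw [List.getLast_eq_getElem, List.getElem_take, List.getElem_drop]
        all_goals try simp only [List.length_take, List.length_drop]
        all_goals try (congr 1)
        all_goals try simp only [List.length_take, List.length_drop]
        all_goals first | rfl | omega
      have hdropLast : ((w.drop I).take (J + 1 - I)).dropLast = (w.drop I).take (J - I) := by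
        rw [List.dropLast_take]
        all_goals try simp only [List.length_take, List.length_drop]
        all_goals try (congr 1)
        all_goals try simp only [List.length_take, List.length_drop]
        all_goals first | rfl | omega
      have hcons : w[J] :: w.drop (J + 1) = w.drop J := (List.drop_eq_getElem_cons hjlt).symm
      have hlen2 : pvJoinLen (w.drop (J + 1)) + pvWordLen w (J : Int) + 1 = pvJoinLen (w.drop J) := by
        rw [← hcons, pvJoinLen_cons, pvWordLen_eq w J hjlt]; ring
      rw [hlast, hdropLast, hcons, hlen2]
      have hJ1 : (J : Int) - 1 = ((J - 1 : Nat) : Int) := by omega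
      have hJ2 : J - 1 + 1 = J := by omega
      have := ih w I (J - 1) (by omega) h1 (by omega) (by omega)
      rw [hJ2] at this
      rw [hJ1]
      exact this
    · rw [if_neg hgt, if_neg hgt]
      have hhead : ((w.drop I).take (J + 1 - I)).head hmidne = w[I] := by
        rw [List.head_eq_getElem, List.getElem_take, List.getElem_drop]
        all_goals try simp only [List.length_take, List.length_drop]
        all_goals try (congr 1)
        all_goals try simp only [List.length_take, List.length_drop]
        all_goals first | rfl | omega
      have htake : w.take I ++ [w[I]] = w.take (I + 1) := by
        rw [List.take_add_one, List.getElem?_eq_getElem hilt]; rfl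
      have htail : ((w.drop I).take (J + 1 - I)).tail = (w.drop (I + 1)).take (J + 1 - (I + 1)) := by
        rw [pvTailTake, List.tail_drop]
        all_goals try simp only [List.length_take, List.length_drop]
        all_goals try (congr 1)
        all_goals try simp only [List.length_take, List.length_drop]
        all_goals first | rfl | omega
      have hlen1 : pvJoinLen (w.take I) + pvWordLen w (I : Int) + 1 = pvJoinLen (w.take (I + 1)) := by
        rw [← htake, pvJoinLen_append_singleton, pvWordLen_eq w I hilt]
      rw [hhead, htake, htail, hlen1]
      have hI1 : (I : Int) + 1 = ((I + 1 : Nat) : Int) := by omega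
      rw [hI1]
      exact ih w (I + 1) J (by omega) (by omega) (by omega) hj

-- ===== VERDICT (by name: the statement is the Claim_ definition above) =====
theorem split_into_two_lines_spec : Claim_equal_split_into_two_lines := by
  intro text _ hpre
  unfold Spec_split_into_two_lines split_into_two_lines split_into_two_lines_alt
  unfold Pre_split_into_two_lines at hpre
  set words := PySem.Str.split₀ text with hw
  by_cases h1 : words.length == 1
  · simp [h1]
  · simp only [h1, Bool.false_eq_true, if_false]
    have hne : words ≠ [] := hpre
    have hn2 : 2 ≤ words.length := by
      have h0 := List.length_pos_of_ne_nil hne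
      have : words.length ≠ 1 := by simpa using h1
      omega
    -- A's initial state is the bridge's state at I = 1, J = length - 2
    have hf0 : [words.getD 0 ""] = words.take 1 := by
      cases hwc : words with
      | nil => exact absurd hwc hne
      | cons x rest => simp [hwc]
    have hs0 : [((PySem.List.pyGet? words (-1)).getD "")] = words.drop (words.length - 1) := by
      rw [PySem.List.pyGet?_neg_one, List.getLast?_eq_getLast_of_ne_nil hne,
        List.drop_length_sub_one hne]
      rfl
    have hmid : PySem.List.slice words (some 1) (some (-1)) =
        (words.drop 1).take (words.length - 2 + 1 - 1) := by
      simp [PySem.List.slice]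
      rw [Nat.min_eq_left (by omega), List.drop_one]
      all_goals (congr 1 <;> omega)
    -- B's starting lengths are the joined lengths of A's starting lines
    have hl1 : pvWordLen words 0 = pvJoinLen (words.take 1) := by
      rw [← hf0, pvJoinLen_singleton]
      simp [pvWordLen, PySem.List.pyGetD_zero]
    have hl2 : pvWordLen words ((words.length : Int) - 1) = pvJoinLen (words.drop (words.length - 1)) := by
      rw [← hs0, pvJoinLen_singleton]
      have hcast : (words.length : Int) - 1 = ((words.length - 1 : Nat) : Int) := by omega
      rw [hcast, pvWordLen_eq words (words.length - 1) (by omega)]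
      rw [PySem.List.pyGet?_neg_one, List.getLast?_eq_getLast_of_ne_nil hne, Option.getD_some,
        List.getLast_eq_getElem]
    have hJ : words.length - 2 + 1 = words.length - 1 := by omega
    have hJI : (words.length : Int) - 2 = ((words.length - 2 : Nat) : Int) := by omega
    rw [hf0, hs0, hmid, hl1, hl2, hJI, hJ]
    simp only [pvLoopA, pvLoopB, Nat.cast_one]
    have hfA : (List.take (words.length - 1 - 1) (List.drop 1 words)).length = words.length - 2 := by
      simp [List.length_take, List.length_drop]; omega
    have hfB : ((((words.length - 2 : Nat) : Int)) + 1 - 1).toNat = words.length - 2 := by omega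
    rw [hfA, hfB]
    have hbr := pvBridge (words.length - 2) words 1 (words.length - 2) (by omega) le_rfl (by omega)
      (by omega)
    rw [hJ] at hbr
    simp only [Nat.cast_one] at hbr
    rw [hbr]
    -- the final slices of B are exactly the take/drop the bridge produced
    have hb := pvLoopB_bounds (words.length - 2) words 1 ((words.length - 2 : Nat) : Int)
      (pvJoinLen (words.take 1)) (pvJoinLen (words.drop (words.length - 1))) (by omega)
    obtain ⟨hb1, hb2⟩ := hb
    set p := pvLoopBF (words.length - 2) words 1 ((words.length - 2 : Nat) : Int)
      (pvJoinLen (words.take 1)) (pvJoinLen (words.drop (words.length - 1))) with hp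
    rw [PySem.List.slice_to words (by omega : (0 : Int) ≤ p.1),
      PySem.List.slice_from words (by omega : (0 : Int) ≤ p.2 + 1)]
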